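-- pv_equiv track=rewrite | github.com/Listonosz/SPD_Pwr | Lab2/main.py | getRPQtime
-- ===== SOURCE A (Python) =====
-- def getRPQtime(RPQ, fullInfo = False):
--     S = []
--     C = []
--     S.append(RPQ[0][1])
--     C.append(S[0]+RPQ[0][2])
--     Cmax = C[0]+ RPQ[0][3]
--
--     for j in range(len(RPQ)-1):
--         k = j + 1
--         S.append(max(RPQ[k][1], C[j]))
--         C.append(S[k] + RPQ[k][2])
--         Cmax = max(Cmax, C[k] + RPQ[k][3])
--
--     if fullInfo: return [Cmax,S]
--     else: return Cmax
-- ===== SOURCE B (Python) =====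
-- def getRPQtime(RPQ, fullInfo=False):
--     # Stage 1: prefix sums of processing times: P[k] = p_0 + ... + p_{k-1}.
--     P = [0]
--     s = 0
--     for job in RPQ:
--         s += job[2]
--         P.append(s)
--     # Stage 2: use the algebraic identity C_k = P[k+1] + max_{j<=k}(r_j - P[j])
--     # for the schedule recurrence S_k = max(r_k, C_{k-1}), C_k = S_k + p_k.
--     best = RPQ[0][1] - P[0]
--     Cmax = None
--     S = []
--     for k, job in enumerate(RPQ):
--         best = max(best, job[1] - P[k])
--         S.append(best + P[k])
--         c = best + P[k + 1] + job[3]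
--         Cmax = c if Cmax is None else max(Cmax, c)
--     return [Cmax, S] if fullInfo else Cmax
-- ===== Notes on version B (the rewrite author's own statement) =====
-- stated objective: alternative
-- what changed: B does not simulate the schedule recurrence S_k=max(r_k,C_{k-1}) at all: it first builds the prefix sums P of the processing times in one pass, then computes Cmax from the algebraic identity C_k = P[k+1] + max_{j<=k}(r_j - P[j]) with a running maximum of r_j - P[j], never holding a completion time C or a start list dependency.
-- outside the precondition, e.g. on getRPQtime([(1, 2, 3, 4)], True): A returns [9, [2]], B returns [9, [2]]; on getRPQtime([], False): A raises IndexError, B raises IndexError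
import Mathlib
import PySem

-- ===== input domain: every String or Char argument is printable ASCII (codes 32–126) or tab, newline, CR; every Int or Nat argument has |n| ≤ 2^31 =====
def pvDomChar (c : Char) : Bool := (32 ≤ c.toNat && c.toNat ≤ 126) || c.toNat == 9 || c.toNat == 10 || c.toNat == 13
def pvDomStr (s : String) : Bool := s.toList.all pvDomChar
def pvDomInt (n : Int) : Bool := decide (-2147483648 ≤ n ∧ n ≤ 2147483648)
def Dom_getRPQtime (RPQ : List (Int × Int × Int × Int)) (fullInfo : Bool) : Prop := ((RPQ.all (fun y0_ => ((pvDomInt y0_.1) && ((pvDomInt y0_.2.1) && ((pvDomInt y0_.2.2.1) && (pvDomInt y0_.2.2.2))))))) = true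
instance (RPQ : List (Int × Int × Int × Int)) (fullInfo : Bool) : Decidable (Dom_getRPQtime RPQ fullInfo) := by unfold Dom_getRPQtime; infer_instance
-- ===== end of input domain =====

-- ===== PORT A =====
-- Literal port of A. A raises IndexError on RPQ = [] and returns a list (not an int) when
-- fullInfo is True; both are excluded by Pre_getRPQtime, so the port returns the Cmax value
-- and uses a default only for the excluded out-of-range access.
def getRPQtime (RPQ : List (Int × Int × Int × Int)) (fullInfo : Bool) : Int :=
  let hd := (PySem.List.pyGet? RPQ 0).getD (0, 0, 0, 0)
  let S : List Int := [hd.2.1]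
  let C : List Int := [hd.2.1 + hd.2.2.1]
  let Cmax : Int := ((PySem.List.pyGet? C 0).getD 0) + hd.2.2.2
  let st := (PySem.List.pyRange 0 ((RPQ.length : Int) - 1) 1).foldl
    (fun (st : List Int × List Int × Int) j =>
      let k := j + 1
      let job := (PySem.List.pyGet? RPQ k).getD (0, 0, 0, 0)
      let s := max job.2.1 ((PySem.List.pyGet? st.2.1 j).getD 0)
      let S' := st.1 ++ [s]
      let c := ((PySem.List.pyGet? (st.1 ++ [s]) k).getD 0) + job.2.2.1
      let C' := st.2.1 ++ [c]
      (S', C', max st.2.2 (((PySem.List.pyGet? (st.2.1 ++ [c]) k).getD 0) + job.2.2.2)))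
    (S, C, Cmax)
  st.2.2

-- ===== PORT B =====
-- Port of Source B: stage 1 builds the prefix-sum list P of processing times (buildStep is the
-- body of Source B's first loop); stage 2 folds a running maximum best = max_{j<=k}(r_j - P[j])
-- over enumerate(RPQ) (enumStep is the body of Source B's second loop) and accumulates
-- Cmax = max_k (best + P[k+1] + q_k).  (S is only built for fullInfo=True, outside Pre_.)
def buildStep (st : List Int × Int) (job : Int × Int × Int × Int) : List Int × Int :=
  let s := st.2 + job.2.2.1
  (st.1 ++ [s], s)

def enumStep (P : List Int) (st : Int × Option Int) (kj : Int × (Int × Int × Int × Int)) :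
    Int × Option Int :=
  let job := kj.2
  let best := max st.1 (job.2.1 - ((PySem.List.pyGet? P kj.1).getD 0))
  let c := best + ((PySem.List.pyGet? P (kj.1 + 1)).getD 0) + job.2.2.2
  (best, some (match st.2 with | none => c | some m => max m c))

def getRPQtime_alt (RPQ : List (Int × Int × Int × Int)) (fullInfo : Bool) : Int :=
  let P := (RPQ.foldl buildStep ([0], 0)).1
  let best0 := ((PySem.List.pyGet? RPQ 0).getD (0, 0, 0, 0)).2.1 - ((PySem.List.pyGet? P 0).getD 0)
  let st := (PySem.List.enumerate RPQ 0).foldl (enumStep P) (best0, (none : Option Int))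
  st.2.getD 0

-- ===== PRECONDITION & SPEC =====
-- Pre_ excludes RPQ = [] (A raises IndexError there) and fullInfo = true (A returns a
-- Python list [Cmax, S], which is not a value of the declared int return type).
def Pre_getRPQtime (RPQ : List (Int × Int × Int × Int)) (fullInfo : Bool) : Prop :=
  RPQ ≠ [] ∧ fullInfo = false
instance (RPQ : List (Int × Int × Int × Int)) (fullInfo : Bool) : Decidable (Pre_getRPQtime RPQ fullInfo) := by unfold Pre_getRPQtime; infer_instance
def pvWitness_getRPQtime : (List (Int × Int × Int × Int)) × Bool := ([(1, 2, 3, 4), (2, 0, 5, 1)], false)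

def Spec_getRPQtime (RPQ : List (Int × Int × Int × Int)) (fullInfo : Bool) (out : Int) : Prop := out = getRPQtime_alt RPQ fullInfo
instance (RPQ : List (Int × Int × Int × Int)) (fullInfo : Bool) (out : Int) : Decidable (Spec_getRPQtime RPQ fullInfo out) := by unfold Spec_getRPQtime; infer_instance

-- ===== CLAIM =====
def Claim_equal_getRPQtime : Prop := ∀ (RPQ : List (Int × Int × Int × Int)) (fullInfo : Bool), Dom_getRPQtime RPQ fullInfo → Pre_getRPQtime RPQ fullInfo → Spec_getRPQtime RPQ fullInfo (getRPQtime RPQ fullInfo)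

-- ===== LEMMAS AND PROOFS =====

-- A's loop body, named so the induction can speak about it (identical to the lambda in port A).
def aStep (L : List (Int × Int × Int × Int)) (st : List Int × List Int × Int) (j : Int) :
    List Int × List Int × Int :=
  let k := j + 1
  let job := (PySem.List.pyGet? L k).getD (0, 0, 0, 0)
  let s := max job.2.1 ((PySem.List.pyGet? st.2.1 j).getD 0)
  let S' := st.1 ++ [s]
  let c := ((PySem.List.pyGet? (st.1 ++ [s]) k).getD 0) + job.2.2.1
  let C' := st.2.1 ++ [c]
  (S', C', max st.2.2 (((PySem.List.pyGet? (st.2.1 ++ [c]) k).getD 0) + job.2.2.2))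

-- The plain schedule recurrence, the proof-side reference point both ports are reduced to.
def simStep (st : Int × Option Int) (job : Int × Int × Int × Int) : Int × Option Int :=
  let s := max job.2.1 st.1
  let prevC := s + job.2.2.1
  let c := prevC + job.2.2.2
  (prevC, some (match st.2 with | none => c | some m => max m c))

def sumP (l : List (Int × Int × Int × Int)) : Int := (l.map (fun j => j.2.2.1)).sum

def mySums : Int → List (Int × Int × Int × Int) → List Int
  | _, [] => []
  | s, j :: t => (s + j.2.2.1) :: mySums (s + j.2.2.1) t

def fullSums (s : Int) (l : List (Int × Int × Int × Int)) : List Int := s :: mySums s l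

theorem buildP_eq (l : List (Int × Int × Int × Int)) :
    ∀ (acc : List Int) (s : Int),
      l.foldl buildStep (acc, s) = (acc ++ mySums s l, s + sumP l) := by
  induction l with
  | nil => intro acc s; simp [mySums, sumP]
  | cons j t ih =>
    intro acc s
    simp only [List.foldl_cons, buildStep]
    rw [ih]
    simp [mySums, sumP]
    ring

theorem mySums_append (a b : List (Int × Int × Int × Int)) :
    ∀ s, mySums s (a ++ b) = mySums s a ++ mySums (s + sumP a) b := by
  induction a with
  | nil => intro s; simp [mySums, sumP]
  | cons j t ih =>
    intro s
    simp only [List.cons_append, mySums, ih]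
    have : s + sumP (j :: t) = s + j.2.2.1 + sumP t := by simp [sumP]; ring
    rw [this]

theorem fullSums_get_len (pre : List (Int × Int × Int × Int)) :
    ∀ s, (fullSums s pre)[pre.length]? = some (s + sumP pre) := by
  induction pre with
  | nil => intro s; simp [fullSums, mySums, sumP]
  | cons j t ih =>
    intro s
    show (s :: mySums s (j :: t))[t.length + 1]? = _
    simp only [mySums, List.getElem?_cons_succ]
    have h1 := ih (s + j.2.2.1)
    simp only [fullSums] at h1
    rw [h1]
    have h2 : s + j.2.2.1 + sumP t = s + sumP (j :: t) := by simp [sumP]; ring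
    rw [h2]

theorem length_mySums (l : List (Int × Int × Int × Int)) : ∀ s, (mySums s l).length = l.length := by
  induction l with
  | nil => intro s; simp [mySums]
  | cons j t ih => intro s; simp [mySums, ih]

theorem P_get (pre rest : List (Int × Int × Int × Int)) :
    PySem.List.pyGet? (fullSums 0 (pre ++ rest)) ((pre.length : Nat) : Int) = some (sumP pre) := by
  rw [PySem.List.pyGet?_natCast]
  have hsplit : fullSums 0 (pre ++ rest) = fullSums 0 pre ++ mySums (sumP pre) rest := by
    simp only [fullSums, mySums_append, zero_add]
    rfl
  rw [hsplit]
  have hlen : pre.length < (fullSums 0 pre).length := by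
    simp [fullSums, length_mySums]
  rw [List.getElem?_append_left hlen]
  have := fullSums_get_len pre 0
  rw [this, zero_add]

-- Main bridge: folding B's enumerate loop over `rest` (indices starting at pre.length, with P
-- the prefix sums of the whole list pre ++ rest) yields the same Cmax accumulator as folding
-- the plain schedule recurrence over `rest` seeded with prevC = best + sumP pre.
theorem enum_sim (rest : List (Int × Int × Int × Int)) :
    ∀ (pre : List (Int × Int × Int × Int)) (best : Int) (m : Option Int),
      ((PySem.List.enumerate rest ((pre.length : Nat) : Int)).foldl
          (enumStep (fullSums 0 (pre ++ rest))) (best, m)).2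
        = (rest.foldl simStep (best + sumP pre, m)).2 := by
  induction rest with
  | nil => intro pre best m; simp [PySem.List.enumerate_nil]
  | cons job rest2 ih =>
    intro pre best m
    rw [PySem.List.enumerate_cons, List.foldl_cons, List.foldl_cons]
    have hP1 : PySem.List.pyGet? (fullSums 0 (pre ++ job :: rest2)) ((pre.length : Nat) : Int)
        = some (sumP pre) := P_get pre (job :: rest2)
    have hre : pre ++ job :: rest2 = (pre ++ [job]) ++ rest2 := by simp
    have hP2 : PySem.List.pyGet? (fullSums 0 (pre ++ job :: rest2)) (((pre.length : Nat) : Int) + 1)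
        = some (sumP pre + job.2.2.1) := by
      have h1 : ((pre.length : Nat) : Int) + 1 = (((pre ++ [job]).length : Nat) : Int) := by simp
      rw [h1, hre]
      have h2 := P_get (pre ++ [job]) rest2
      rw [h2]
      simp [sumP]
    have hkey : max best (job.2.1 - sumP pre) + sumP pre = max job.2.1 (best + sumP pre) := by
      rcases le_total best (job.2.1 - sumP pre) with h | h
      · rw [max_eq_right h, max_eq_left (by omega)]; ring
      · rw [max_eq_left h, max_eq_right (by omega)]
    have hstep : enumStep (fullSums 0 (pre ++ job :: rest2)) (best, m) ((pre.length : Nat), job)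
        = (max best (job.2.1 - sumP pre),
           (simStep (best + sumP pre, m) job).2) := by
      simp only [enumStep, hP1, hP2, Option.getD_some, simStep]
      cases m with
      | none =>
        simp only [Prod.mk.injEq, Option.some.injEq]
        refine ⟨trivial, ?_⟩
        rw [← add_assoc, hkey]
      | some mm =>
        simp only [Prod.mk.injEq, Option.some.injEq]
        refine ⟨trivial, ?_⟩
        rw [← add_assoc, hkey]
    rw [hstep]
    have hsimfst : (simStep (best + sumP pre, m) job).1
        = max best (job.2.1 - sumP pre) + sumP (pre ++ [job]) := by
      have h3 : sumP (pre ++ [job]) = sumP pre + job.2.2.1 := by simp [sumP]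
      simp only [simStep, h3]
      rw [← add_assoc, hkey]
    have hidx : ((pre.length : Nat) : Int) + 1 = (((pre ++ [job]).length : Nat) : Int) := by simp
    rw [hidx, hre, ih (pre ++ [job]) (max best (job.2.1 - sumP pre)) ((simStep (best + sumP pre, m) job).2)]
    rw [← hsimfst]

-- B's port evaluated as the plain recurrence fold (enum_sim with pre = []).
theorem alt_eq_sim (first : Int × Int × Int × Int) (rest : List (Int × Int × Int × Int))
    (fullInfo : Bool) :
    getRPQtime_alt (first :: rest) fullInfo
      = (((first :: rest).foldl simStep (first.2.1, (none : Option Int))).2).getD 0 := by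
  have key : getRPQtime_alt (first :: rest) fullInfo
      = ((PySem.List.enumerate (first :: rest) 0).foldl
          (enumStep ((first :: rest).foldl buildStep ([0], 0)).1)
          ((((PySem.List.pyGet? (first :: rest) 0).getD (0, 0, 0, 0)).2.1
            - ((PySem.List.pyGet? ((first :: rest).foldl buildStep ([0], 0)).1 0).getD 0)),
           (none : Option Int))).2.getD 0 := rfl
  rw [key]
  have hbuild : ((first :: rest).foldl buildStep ([0], 0)).1 = fullSums 0 (first :: rest) := by
    rw [buildP_eq]
    rfl
  rw [hbuild]
  have hb0 : ((PySem.List.pyGet? (first :: rest) 0).getD (0, 0, 0, 0)).2.1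
      - ((PySem.List.pyGet? (fullSums 0 (first :: rest)) 0).getD 0) = first.2.1 := by
    simp [fullSums]
  rw [hb0]
  have h1 := enum_sim (first :: rest) [] first.2.1 none
  simp only [List.nil_append, List.length_nil, Nat.cast_zero] at h1
  rw [h1]
  have h2 : first.2.1 + sumP [] = first.2.1 := by simp [sumP]
  rw [h2]

theorem getRPQtime_as_fold (RPQ : List (Int × Int × Int × Int)) (fullInfo : Bool) :
    getRPQtime RPQ fullInfo =
      (let hd := (PySem.List.pyGet? RPQ 0).getD (0, 0, 0, 0)
       ((PySem.List.pyRange 0 ((RPQ.length : Int) - 1) 1).foldl (aStep RPQ)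
         ([hd.2.1], [hd.2.1 + hd.2.2.1],
          ((PySem.List.pyGet? [hd.2.1 + hd.2.2.1] 0).getD 0) + hd.2.2.2)).2.2) := rfl

-- After A has processed the jobs of `pre` (S and C have one entry per job and C's last entry
-- is prevC), folding A's indexed loop over the remaining indices computes the same Cmax as
-- folding the plain recurrence over `rest`.
theorem fold_agree (rest : List (Int × Int × Int × Int)) :
    ∀ (pre : List (Int × Int × Int × Int)) (S C : List Int) (Cmax prevC : Int),
      pre ≠ [] → S.length = pre.length → C.length = pre.length → C.getLast? = some prevC →
      ((PySem.List.pyRange ((pre.length : Int) - 1) (((pre ++ rest).length : Int) - 1) 1).foldl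
          (aStep (pre ++ rest)) (S, C, Cmax)).2.2
        = ((rest.foldl simStep (prevC, some Cmax)).2).getD 0 := by
  induction rest with
  | nil =>
    intro pre S C Cmax prevC hpre hS hC hlast
    rw [List.append_nil]
    rw [PySem.List.pyRange_one_eq_nil (by omega)]
    simp [List.foldl]
  | cons job rest ih =>
    intro pre S C Cmax prevC hpre hS hC hlast
    have hprelen : 1 ≤ pre.length := by
      cases pre with
      | nil => exact absurd rfl hpre
      | cons a l => simp
    have hb : ((pre.length : Int) - 1) < (((pre ++ job :: rest).length : Int) - 1) := by
      simp only [List.length_append, List.length_cons]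
      push_cast
      omega
    rw [PySem.List.pyRange_one_cons hb, List.foldl_cons]
    have hk : ((pre.length : Int) - 1) + 1 = (pre.length : Int) := by ring
    have hgetJob : PySem.List.pyGet? (pre ++ job :: rest) (((pre.length : Int) - 1) + 1) = some job := by
      rw [hk]; exact PySem.List.pyGet?_append_length _ _ _
    have hgetC : PySem.List.pyGet? C ((pre.length : Int) - 1) = some prevC := by
      have h1 : ((pre.length : Int) - 1) = ((pre.length - 1 : Nat) : Int) := by push_cast [hprelen]; omega
      rw [h1, PySem.List.pyGet?_natCast, ← hC, ← List.getLast?_eq_getElem?]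
      exact hlast
    have hgetS : PySem.List.pyGet? (S ++ [max job.2.1 prevC]) (((pre.length : Int) - 1) + 1)
        = some (max job.2.1 prevC) := by
      rw [hk, ← hS]; exact PySem.List.pyGet?_append_length _ _ _
    have hgetC2 : PySem.List.pyGet? (C ++ [max job.2.1 prevC + job.2.2.1]) (((pre.length : Int) - 1) + 1)
        = some (max job.2.1 prevC + job.2.2.1) := by
      rw [hk, ← hC]; exact PySem.List.pyGet?_append_length _ _ _
    have hstep : aStep (pre ++ job :: rest) (S, C, Cmax) ((pre.length : Int) - 1)
        = (S ++ [max job.2.1 prevC], C ++ [max job.2.1 prevC + job.2.2.1],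
           max Cmax (max job.2.1 prevC + job.2.2.1 + job.2.2.2)) := by
      simp only [aStep, hgetJob, hgetC, Option.getD_some, hgetS, hgetC2]
    rw [hstep, hk]
    have happ : pre ++ job :: rest = (pre ++ [job]) ++ rest := by simp
    have hlen' : ((pre ++ [job]).length : Int) - 1 = (pre.length : Int) := by simp
    rw [happ, ← hlen']
    rw [ih (pre ++ [job]) (S ++ [max job.2.1 prevC]) (C ++ [max job.2.1 prevC + job.2.2.1])
      (max Cmax (max job.2.1 prevC + job.2.2.1 + job.2.2.2)) (max job.2.1 prevC + job.2.2.1)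
      (by simp) (by simp [hS]) (by simp [hC]) (by simp)]
    simp [List.foldl_cons, simStep]

-- ===== VERDICT =====
theorem getRPQtime_spec : Claim_equal_getRPQtime := by
  intro RPQ fullInfo _hDom hPre
  unfold Spec_getRPQtime
  obtain ⟨hne, -⟩ := hPre
  cases RPQ with
  | nil => exact absurd rfl hne
  | cons first rest =>
    rw [getRPQtime_as_fold, alt_eq_sim]
    have hfa := fold_agree rest [first] [first.2.1] [first.2.1 + first.2.2.1]
        (((PySem.List.pyGet? [first.2.1 + first.2.2.1] 0).getD 0) + first.2.2.2)
        (first.2.1 + first.2.2.1) (by simp) (by simp) (by simp) (by simp)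
    simp only [PySem.List.pyGet?_zero_cons, Option.getD_some, List.singleton_append,
      List.length_cons, List.length_nil] at hfa ⊢
    norm_num at hfa
    have hcast : (((rest.length + 1 : Nat) : Int) - 1) = (rest.length : Int) := by push_cast; ring
    rw [hcast, hfa]
    simp [List.foldl_cons, simStep]
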